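-- pv_equiv track=rewrite | github.com/rwspicer/masters-project | scripts/build_seward_data.py | sort_by_year_month
-- ===== SOURCE A (Python) =====
-- def sort_by_year_month (unordered):
--     """ sort files by year then month, instead of month year """
--
--     ordered = []
--     years  = sorted(list(set([fn.split('.')[0][-4:] for fn in unordered])))
--
--     for yr in years:
--         ordered += sorted(
--             [fn for fn in unordered if fn.split('.')[0][-4:] == yr ]
--         )
--
--     return ordered
-- ===== SOURCE B (Python) =====
-- def sort_by_year_month(unordered):
--     """ sort files by year then month, instead of month year """
--     return sorted(unordered, key=lambda fn: (fn.split('.')[0][-4:], fn))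
-- ===== Notes on version B (the rewrite author's own statement) =====
-- stated objective: faster
-- what changed: Replaces A's build-sorted-year-set-then-rescan-and-sort-per-year loop by a single stable sort of the whole list under the compound key (year, filename), removing the full scan per distinct year.
import Mathlib
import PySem

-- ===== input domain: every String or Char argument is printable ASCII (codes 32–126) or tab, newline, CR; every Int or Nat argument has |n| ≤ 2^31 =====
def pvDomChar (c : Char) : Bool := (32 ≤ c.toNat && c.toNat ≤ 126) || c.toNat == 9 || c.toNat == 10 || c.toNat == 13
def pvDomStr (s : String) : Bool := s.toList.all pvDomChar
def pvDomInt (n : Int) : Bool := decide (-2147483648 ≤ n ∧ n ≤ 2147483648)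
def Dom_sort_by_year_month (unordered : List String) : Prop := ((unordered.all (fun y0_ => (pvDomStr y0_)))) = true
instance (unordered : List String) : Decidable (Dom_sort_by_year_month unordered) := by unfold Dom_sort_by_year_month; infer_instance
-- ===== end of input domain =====

-- B replaces A's per-year rescans of the whole list by one sort with the compound key
-- (year, filename), removing the per-year full scans; objective: faster (measured).

-- shared key helper: fn.split('.')[0][-4:]  (split('.') is never empty, so the
-- .getD/.headD defaults are never reached; exact otherwise)
def pvYearKey (fn : String) : String :=
  PySem.Str.slice (((PySem.Str.split? fn ".").getD []).headD "") (some (-4)) none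

-- ===== PORT A =====
def sort_by_year_month (unordered : List String) : List String :=
  let years := PySem.List.sorted (PySem.Set.ofList (unordered.map (fun fn => pvYearKey fn))) (fun y => y) false
  List.foldl
    (fun ordered yr =>
      ordered ++ PySem.List.sorted (unordered.filter (fun fn => pvYearKey fn == yr)) (fun x => x) false)
    [] years

-- ===== PORT B =====
def sort_by_year_month_alt (unordered : List String) : List String :=
  PySem.List.sorted2 unordered (fun fn => pvYearKey fn) (fun fn => fn) false

-- ===== PRECONDITION & SPEC =====
def Spec_sort_by_year_month (unordered : List String) (out : List String) : Prop := out = sort_by_year_month_alt unordered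
instance (unordered : List String) (out : List String) : Decidable (Spec_sort_by_year_month unordered out) := by unfold Spec_sort_by_year_month; infer_instance

-- ===== CLAIM (what is proved, stated in full; the proofs are below) =====
def Claim_equal_sort_by_year_month : Prop := ∀ (unordered : List String), Dom_sort_by_year_month unordered → Spec_sort_by_year_month unordered (sort_by_year_month unordered)

-- ===== LEMMAS AND PROOFS =====

-- the comparison sorted2 uses in B's port
def pvBefore (a b : String) : Bool :=
  decide (pvYearKey a < pvYearKey b) || (!decide (pvYearKey b < pvYearKey a) && decide (a < b))

-- the (total, antisymmetric) order both outputs are sorted by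
def pvLe (a b : String) : Prop :=
  pvYearKey a < pvYearKey b ∨ (pvYearKey a = pvYearKey b ∧ a ≤ b)

lemma pvBefore_false_iff (a b : String) : pvBefore b a = false ↔ pvLe a b := by
  simp only [pvBefore, pvLe, Bool.or_eq_false_iff, Bool.and_eq_false_iff, Bool.not_eq_false',
    decide_eq_false_iff_not, decide_eq_true_iff, not_lt]
  constructor
  · rintro ⟨h1, h2 | h2⟩
    · exact Or.inl h2
    · rcases lt_or_eq_of_le h1 with h | h
      · exact Or.inl h
      · exact Or.inr ⟨h, h2⟩
  · rintro (h | ⟨h1, h2⟩)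
    · exact ⟨le_of_lt h, Or.inl h⟩
    · exact ⟨le_of_eq h1, Or.inr h2⟩

lemma pvBefore_true_iff (a b : String) :
    pvBefore a b = true ↔ (pvYearKey a < pvYearKey b ∨ (pvYearKey a = pvYearKey b ∧ a < b)) := by
  simp only [pvBefore, Bool.or_eq_true, Bool.and_eq_true, Bool.not_eq_true',
    decide_eq_false_iff_not, decide_eq_true_iff, not_lt]
  constructor
  · rintro (h | ⟨h1, h2⟩)
    · exact Or.inl h
    · rcases lt_or_eq_of_le h1 with h | h
      · exact Or.inl h
      · exact Or.inr ⟨h, h2⟩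
  · rintro (h | ⟨h1, h2⟩)
    · exact Or.inl h
    · exact Or.inr ⟨le_of_eq h1, h2⟩

lemma pvLe_antisymm (a b : String) (h1 : pvLe a b) (h2 : pvLe b a) : a = b := by
  rcases h1 with h1 | ⟨_, h1⟩ <;> rcases h2 with h2 | ⟨_, h2⟩
  · exact absurd h2 (not_lt.2 (le_of_lt h1))
  · exact absurd h1 (not_lt.2 (le_of_eq ‹pvYearKey b = pvYearKey a›))
  · exact absurd h2 (not_lt.2 (le_of_eq ‹pvYearKey a = pvYearKey b›))
  · exact le_antisymm h1 h2

lemma pvBefore_asymm (a b : String) (h : pvBefore a b = true) : pvBefore b a = false := by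
  rw [pvBefore_true_iff] at h
  rw [pvBefore_false_iff, pvLe]
  rcases h with h | ⟨h1, h2⟩
  · exact Or.inl h
  · exact Or.inr ⟨h1, le_of_lt h2⟩

lemma pvBefore_trans (a b c : String) (h1 : pvBefore a b = true) (h2 : pvBefore b c = true) :
    pvBefore a c = true := by
  rw [pvBefore_true_iff] at h1 h2 ⊢
  rcases h1 with h1 | ⟨h1, h1'⟩ <;> rcases h2 with h2 | ⟨h2, h2'⟩
  · exact Or.inl (lt_trans h1 h2)
  · exact Or.inl (lt_of_lt_of_eq h1 h2)
  · exact Or.inl (lt_of_eq_of_lt h1 h2)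
  · exact Or.inr ⟨h1.trans h2, lt_trans h1' h2'⟩

-- inserting into a list sorted by pvBefore keeps it sorted
lemma pairwise_insertBy (x : String) (ys : List String)
    (h : ys.Pairwise (fun a b => pvBefore b a = false)) :
    (PySem.List.insertBy pvBefore x ys).Pairwise (fun a b => pvBefore b a = false) := by
  induction ys with
  | nil => simp [PySem.List.insertBy]
  | cons y ys ih =>
    rw [List.pairwise_cons] at h
    by_cases hxy : pvBefore x y = true
    · rw [PySem.List.insertBy, if_pos hxy]
      refine List.pairwise_cons.2 ⟨?_, List.pairwise_cons.2 ⟨h.1, h.2⟩⟩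
      intro z hz
      rcases hz with _ | hz
      · exact pvBefore_asymm x y hxy
      · by_contra hc
        have hzx : pvBefore z x = true := by
          cases hcase : pvBefore z x
          · exact absurd hcase hc
          · rfl
        have := pvBefore_trans z x y hzx hxy
        have := h.1 z (by assumption)
        simp_all
    · rw [PySem.List.insertBy, if_neg hxy]
      refine List.pairwise_cons.2 ⟨?_, ih h.2⟩
      intro z hz
      rw [PySem.List.mem_insertBy] at hz
      rcases hz with rfl | hz
      · simpa using hxy
      · exact h.1 z hz

lemma foldl_insertBy_pairwise (xs acc : List String)
    (h : acc.Pairwise (fun a b => pvBefore b a = false)) :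
    (List.foldl (fun acc x => PySem.List.insertBy pvBefore x acc) acc xs).Pairwise
      (fun a b => pvBefore b a = false) := by
  induction xs generalizing acc with
  | nil => exact h
  | cons x xs ih => exact ih _ (pairwise_insertBy x acc h)

lemma alt_eq_foldl (unordered : List String) :
    sort_by_year_month_alt unordered =
      List.foldl (fun acc x => PySem.List.insertBy pvBefore x acc) [] unordered := rfl

lemma alt_pairwise (unordered : List String) :
    (sort_by_year_month_alt unordered).Pairwise pvLe := by
  rw [alt_eq_foldl]
  exact (foldl_insertBy_pairwise unordered [] (by simp)).imp
    (fun h => (pvBefore_false_iff _ _).1 h)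

-- A's foldl as a flatMap over the sorted distinct years
lemma a_eq_flatMap (unordered : List String) :
    sort_by_year_month unordered =
      (PySem.List.sorted (PySem.Set.ofList (unordered.map (fun fn => pvYearKey fn))) (fun y => y) false).flatMap
        (fun yr => PySem.List.sorted (unordered.filter (fun fn => pvYearKey fn == yr)) (fun x => x) false) := by
  unfold sort_by_year_month
  rw [PySem.List.foldl_append_eq_flatMap]
  rfl

-- distinct year buckets concatenated give back a permutation of the input
lemma flatMap_filter_perm (key : String → String) (ys : List String) (xs : List String)
    (hnd : ys.Nodup) (hcov : ∀ x ∈ xs, key x ∈ ys) :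
    (ys.flatMap (fun yr => xs.filter (fun fn => key fn == yr))).Perm xs := by
  induction ys generalizing xs with
  | nil =>
    cases xs with
    | nil => simp
    | cons x xs => exact absurd (hcov x (by simp)) (by simp)
  | cons y ys ih =>
    rw [List.flatMap_cons]
    have hnd' := List.nodup_cons.1 hnd
    have hbuck : ys.flatMap (fun yr => xs.filter (fun fn => key fn == yr)) =
        ys.flatMap (fun yr => (xs.filter (fun fn => !(key fn == y))).filter (fun fn => key fn == yr)) := by
      apply List.flatMap_congr
      intro yr hyr
      rw [List.filter_filter]
      apply List.filter_congr
      intro fn _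
      cases hk : (key fn == yr)
      · simp
      · have : key fn = yr := by simpa using hk
        have : ¬ (key fn == y) = true := by
          simp only [beq_iff_eq, this]
          intro hcontra
          exact hnd'.1 (hcontra ▸ hyr)
        simp [this]
    rw [hbuck]
    have hih := ih (xs.filter (fun fn => !(key fn == y))) hnd'.2 (by
      intro x hx
      rw [List.mem_filter] at hx
      have := hcov x hx.1
      simp only [List.mem_cons] at this
      rcases this with h | h
      · exact absurd h (by simpa using hx.2)
      · exact h)
    exact List.Perm.trans (List.Perm.append_left _ hih) (List.filter_append_perm _ xs)

lemma a_perm (unordered : List String) : (sort_by_year_month unordered).Perm unordered := by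
  rw [a_eq_flatMap]
  have step1 : ((PySem.List.sorted (PySem.Set.ofList (unordered.map (fun fn => pvYearKey fn))) (fun y => y) false).flatMap
      (fun yr => PySem.List.sorted (unordered.filter (fun fn => pvYearKey fn == yr)) (fun x => x) false)).Perm
      ((PySem.List.sorted (PySem.Set.ofList (unordered.map (fun fn => pvYearKey fn))) (fun y => y) false).flatMap
      (fun yr => unordered.filter (fun fn => pvYearKey fn == yr))) := by
    apply List.Perm.flatMap_left
    intro yr _
    exact PySem.List.sorted_perm _ _ _
  refine step1.trans ?_
  apply flatMap_filter_perm
  · exact (PySem.List.sorted_perm _ _ _).symm.nodup (PySem.Set.nodup_ofList _)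
  · intro x hx
    rw [PySem.List.mem_sorted, PySem.Set.mem_ofList]
    exact List.mem_map.2 ⟨x, hx, rfl⟩

lemma a_pairwise (unordered : List String) : (sort_by_year_month unordered).Pairwise pvLe := by
  rw [a_eq_flatMap]
  rw [List.pairwise_flatMap]
  constructor
  · intro yr _
    apply (PySem.List.sorted_pairwise _ _).imp_of_mem
    intro a b ha hb hab
    rw [PySem.List.mem_sorted, List.mem_filter] at ha hb
    right
    refine ⟨?_, hab⟩
    have h1 : pvYearKey a = yr := by simpa using ha.2
    have h2 : pvYearKey b = yr := by simpa using hb.2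
    rw [h1, h2]
  · apply (PySem.List.sorted_ofList_pairwise_lt _).imp
    intro y1 y2 hlt x hx z hz
    rw [PySem.List.mem_sorted, List.mem_filter] at hx hz
    left
    have h1 : pvYearKey x = y1 := by simpa using hx.2
    have h2 : pvYearKey z = y2 := by simpa using hz.2
    rw [h1, h2]; exact hlt

-- ===== VERDICT (by name: the statement is the Claim_ definition above) =====
theorem sort_by_year_month_spec : Claim_equal_sort_by_year_month := by
  intro unordered _
  unfold Spec_sort_by_year_month
  apply List.Perm.eq_of_pairwise
  · intro a b _ _ h1 h2; exact pvLe_antisymm a b h1 h2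
  · exact a_pairwise unordered
  · exact alt_pairwise unordered
  · exact (a_perm unordered).trans (PySem.List.sorted2_perm _ _ _ _).symm
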